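-- pv_equiv track=rewrite | github.com/kobotoolbox/formpack | src/formpack/utils/replace_aliases.py | aliases_to_ordered_dict
-- ===== SOURCE A (Python) =====
-- from collections import defaultdict, OrderedDict
--
-- def aliases_to_ordered_dict(_d):
--     """
--     unpacks a dict-with-lists to an ordered dict with keys sorted by length
--     """
--     arr = []
--     for original, aliases in _d.items():
--         arr.append((original, original))
--         if isinstance(aliases, bool):
--             aliases = [original]
--         elif isinstance(aliases, str):
--             aliases = [aliases]
--         for alias in aliases:
--             arr.append((alias, original,))
--     return OrderedDict(sorted(arr, key=lambda _kv: 0-len(_kv[0])))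
-- ===== SOURCE B (Python) =====
-- from collections import defaultdict, OrderedDict
--
-- def aliases_to_ordered_dict(_d):
--     """
--     Bucket the (alias, original) pairs by key length, then emit buckets in
--     strictly descending length order -- no comparison sort of the pair list.
--     """
--     buckets = defaultdict(list)
--     for original, aliases in _d.items():
--         buckets[len(original)].append((original, original))
--         if isinstance(aliases, bool):
--             aliases = [original]
--         elif isinstance(aliases, str):
--             aliases = [aliases]
--         for alias in aliases:
--             buckets[len(alias)].append((alias, original))
--     out = OrderedDict()
--     for length in sorted(buckets, reverse=True):
--         for key, value in buckets[length]:
--             out[key] = value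
--     return out
-- ===== Notes on version B (the rewrite author's own statement) =====
-- stated objective: alternative
-- what changed: Replaces A's build-one-list-then-stable-sort-by-descending-length with bucketing each (alias, original) pair into a dict keyed by key length and emitting the buckets in strictly descending length order, which reproduces the stable sort's ordering without a comparison sort of the pair list.
import Mathlib
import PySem

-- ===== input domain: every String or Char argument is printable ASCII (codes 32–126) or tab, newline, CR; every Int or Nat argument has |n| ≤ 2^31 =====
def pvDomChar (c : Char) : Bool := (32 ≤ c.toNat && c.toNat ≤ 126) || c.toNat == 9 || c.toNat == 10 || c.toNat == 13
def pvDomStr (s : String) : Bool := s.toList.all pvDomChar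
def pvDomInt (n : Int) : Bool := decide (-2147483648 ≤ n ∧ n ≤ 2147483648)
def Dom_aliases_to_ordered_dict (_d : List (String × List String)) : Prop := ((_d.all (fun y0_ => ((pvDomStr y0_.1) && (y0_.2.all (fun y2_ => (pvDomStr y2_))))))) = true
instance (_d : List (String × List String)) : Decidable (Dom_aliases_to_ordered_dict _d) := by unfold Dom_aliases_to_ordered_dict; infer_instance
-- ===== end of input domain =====

-- B buckets the (alias, original) pairs by key length and emits buckets in descending
-- length order instead of stable-sorting the whole pair list (alternative decomposition).


-- ===== PORT A =====
-- the isinstance(ales, bool)/isinstance(ales, str) branches can never fire on a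
-- value typed List String, so they are omitted
def aliases_to_ordered_dict (_d : List (String × List String)) : List (String × String) :=
  let arr := _d.foldl (fun arr p =>
    p.2.foldl (fun a al => a ++ [(al, p.1)]) (arr ++ [(p.1, p.1)])) []
  (PySem.Dict.ofList
    (PySem.List.sorted arr (fun kv => (0 : Int) - PySem.Str.len kv.1))).items

-- ===== PORT B =====
def aliases_to_ordered_dict_alt (_d : List (String × List String)) : List (String × String) :=
  let buckets := _d.foldl (fun bk p =>
    p.2.foldl (fun bk al => bk.modify (PySem.Str.len al) [] (· ++ [(al, p.1)]))
      (bk.modify (PySem.Str.len p.1) [] (· ++ [(p.1, p.1)]))) PySem.Dict.empty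
  let lengths := PySem.List.sorted buckets.keys (fun x => x) true
  let pairs := lengths.foldl (fun acc L => acc ++ buckets.getD L []) []
  (PySem.Dict.ofList pairs).items

-- ===== PRECONDITION & SPEC =====
def Spec_aliases_to_ordered_dict (_d : List (String × List String)) (out : List (String × String)) : Prop := out = aliases_to_ordered_dict_alt _d
instance (_d : List (String × List String)) (out : List (String × String)) : Decidable (Spec_aliases_to_ordered_dict _d out) := by unfold Spec_aliases_to_ordered_dict; infer_instance

-- ===== CLAIM (what is proved, stated in full; the proofs are below) =====
def Claim_equal_aliases_to_ordered_dict : Prop := ∀ (_d : List (String × List String)), Dom_aliases_to_ordered_dict _d → Spec_aliases_to_ordered_dict _d (aliases_to_ordered_dict _d)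

-- ===== LEMMAS AND PROOFS =====

-- the flat list of (key, original) pairs both programs traverse, in A's append order
def pairsOf (_d : List (String × List String)) : List (String × String) :=
  _d.flatMap (fun p => (p.1, p.1) :: p.2.map (fun a => (a, p.1)))

-- both programs' nested loop over _d is a fold of its step over pairsOf
lemma nested_foldl {σ : Type} (g : σ → (String × String) → σ)
    (_d : List (String × List String)) (s : σ) :
    _d.foldl (fun s p => p.2.foldl (fun s a => g s (a, p.1)) (g s (p.1, p.1))) s
      = (pairsOf _d).foldl g s := by
  induction _d generalizing s with
  | nil => rfl
  | cons p tl ih =>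
      simp only [pairsOf, List.flatMap_cons, List.foldl_cons, List.foldl_append,
        List.foldl_map] at *
      exact ih _

lemma insertBy_cons (before : (String × String) → (String × String) → Bool)
    (x y : String × String) (ys : List (String × String)) :
    PySem.List.insertBy before x (y :: ys)
      = if before x y then x :: y :: ys else y :: PySem.List.insertBy before x ys := by
  simp [PySem.List.insertBy]

lemma insertBy_append_left (before : (String × String) → (String × String) → Bool)
    (x : String × String) (l t : List (String × String))
    (h : ∀ y ∈ l, before x y = false) :
    PySem.List.insertBy before x (l ++ t) = l ++ PySem.List.insertBy before x t := by
  induction l with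
  | nil => rfl
  | cons y ys ih =>
      simp only [List.cons_append, insertBy_cons, h y (by simp), if_false,
        Bool.false_eq_true]
      exact congrArg (y :: ·) (ih (fun z hz => h z (by simp [hz])))

lemma insertBy_all_before (before : (String × String) → (String × String) → Bool)
    (x : String × String) (t : List (String × String))
    (h : ∀ y ∈ t, before x y = true) :
    PySem.List.insertBy before x t = x :: t := by
  cases t with
  | nil => rfl
  | cons y ys => simp [insertBy_cons, h y (by simp)]

-- inserting x into a concatenation of buckets of strictly descending length appends it
-- to the end of its own bucket
lemma insertBy_flatMap (x : String × String) (ks : List Int)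
    (f : Int → List (String × String))
    (hdec : ks.Pairwise (fun a b => b < a))
    (hfk : ∀ L ∈ ks, ∀ y ∈ f L, PySem.Str.len y.1 = L)
    (hx : PySem.Str.len x.1 ∈ ks) :
    PySem.List.insertBy
        (fun a b => decide ((0 : Int) - PySem.Str.len a.1 < (0 : Int) - PySem.Str.len b.1))
        x (ks.flatMap f)
      = ks.flatMap (fun L => f L ++ if PySem.Str.len x.1 == L then [x] else []) := by
  induction ks with
  | nil => cases hx
  | cons L ks ih =>
      rw [List.pairwise_cons] at hdec
      obtain ⟨hL, hdec'⟩ := hdec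
      simp only [List.flatMap_cons]
      by_cases hLx : PySem.Str.len x.1 = L
      · have h1 : ∀ y ∈ f L, (decide ((0 : Int) - PySem.Str.len x.1 < (0 : Int) - PySem.Str.len y.1)) = false := by
          intro y hy
          have hyl := hfk L (by simp) y hy
          have hxl := hLx
          simp [PySem.Str.len] at hyl hxl
          simp [PySem.Str.len]
          omega
        rw [insertBy_append_left _ _ _ _ h1]
        have h2 : ∀ y ∈ ks.flatMap f, (decide ((0 : Int) - PySem.Str.len x.1 < (0 : Int) - PySem.Str.len y.1)) = true := by
          intro y hy
          obtain ⟨L', hL', hyL'⟩ := List.mem_flatMap.mp hy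
          have hlen := hfk L' (by simp [hL']) y hyL'
          have hxl := hLx
          have hlt : L' < L := hL L' hL'
          simp [PySem.Str.len] at hlen hxl
          simp [PySem.Str.len]
          omega
        rw [insertBy_all_before _ _ _ h2]
        have h3 : ks.flatMap (fun L' => f L' ++ if PySem.Str.len x.1 == L' then [x] else [])
            = ks.flatMap f := by
          apply List.flatMap_congr
          intro L' hL'
          have : L' < L := hL L' hL'
          have hne : PySem.Str.len x.1 ≠ L' := by omega
          simp [PySem.Str.len] at hne
          simp [hne]
        rw [h3]
        have hxl := hLx
        simp [PySem.Str.len] at hxl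
        simp [hxl]
      · have hx' : PySem.Str.len x.1 ∈ ks := by
          rcases List.mem_cons.mp hx with h | h
          · exact absurd h hLx
          · exact h
        have hxL : PySem.Str.len x.1 < L := hL _ hx'
        have h1 : ∀ y ∈ f L, (decide ((0 : Int) - PySem.Str.len x.1 < (0 : Int) - PySem.Str.len y.1)) = false := by
          intro y hy
          have hyl := hfk L (by simp) y hy
          have hxl := hxL
          simp [PySem.Str.len] at hyl hxl
          simp [PySem.Str.len]
          omega
        rw [insertBy_append_left _ _ _ _ h1,
          ih hdec' (fun L' h' => hfk L' (by simp [h'])) hx']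
        have hxl : ¬ ((x.1.length : Int) = L) := by simpa [PySem.Str.len] using hLx
        simp [hxl]

-- A's stable sort by descending key length is the concatenation, over the distinct
-- lengths in strictly descending order, of the per-length sublists in original order
lemma sorted_eq_buckets (arr : List (String × String)) (ks : List Int)
    (hdec : ks.Pairwise (fun a b => b < a))
    (hcov : ∀ q ∈ arr, PySem.Str.len q.1 ∈ ks) :
    PySem.List.sorted arr (fun kv => (0 : Int) - PySem.Str.len kv.1)
      = ks.flatMap (fun L => arr.filter (fun q => PySem.Str.len q.1 == L)) := by
  induction arr using List.reverseRecOn with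
  | nil => simp [PySem.List.sorted_eq_foldl_insertBy]
  | append_singleton arr x ih =>
      rw [PySem.List.sorted_eq_foldl_insertBy, List.foldl_append, List.foldl_cons,
        List.foldl_nil, ← PySem.List.sorted_eq_foldl_insertBy,
        ih (fun q hq => hcov q (by simp [hq])),
        insertBy_flatMap x ks _ hdec
          (fun L _ y hy => by
            have := (List.mem_filter.mp hy).2
            simpa using this)
          (hcov x (by simp))]
      apply List.flatMap_congr
      intro L _
      simp [List.filter_append, List.filter_singleton]

-- A's pair-building loop produces exactly pairsOf
lemma arrA_eq (_d : List (String × List String)) :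
    _d.foldl (fun arr p =>
        p.2.foldl (fun a al => a ++ [(al, p.1)]) (arr ++ [(p.1, p.1)])) []
      = pairsOf _d := by
  exact (nested_foldl (fun (s : List (String × String)) q => s ++ [q]) _d []).trans
    ((PySem.List.foldl_append_singleton (pairsOf _d) []).trans (List.nil_append _))

-- B's bucket-building loop is a fold of the bucket step over pairsOf
lemma bucketsB_eq (_d : List (String × List String)) :
    _d.foldl (fun bk p =>
        p.2.foldl (fun bk al => bk.modify (PySem.Str.len al) [] (· ++ [(al, p.1)]))
          (bk.modify (PySem.Str.len p.1) [] (· ++ [(p.1, p.1)]))) PySem.Dict.empty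
      = (pairsOf _d).foldl
          (fun d q => d.modify (PySem.Str.len q.1) [] (· ++ [q])) PySem.Dict.empty := by
  have h := nested_foldl
    (fun (d : PySem.Dict Int (List (String × String))) q =>
      d.modify (PySem.Str.len q.1) [] (· ++ [q])) _d PySem.Dict.empty
  simpa using h

-- each bucket holds the per-length sublist in original order
lemma getD_bucketsB (arr : List (String × String)) (c : Int) :
    ((arr.foldl (fun d q => d.modify (PySem.Str.len q.1) [] (· ++ [q]))
        PySem.Dict.empty).getD c [])
      = arr.filter (fun q => PySem.Str.len q.1 == c) := by
  have h : arr.foldl (fun d q => d.modify (PySem.Str.len q.1) [] (· ++ [q])) PySem.Dict.empty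
      = (arr.map (fun q => (PySem.Str.len q.1, q))).foldl
          (fun d p => d.modify p.1 [] (· ++ [p.2])) PySem.Dict.empty := by
    rw [List.foldl_map]
  rw [h, PySem.Dict.getD_foldl_modify_append]
  simp [List.filter_map, Function.comp_def]

-- the bucket keys are the distinct key lengths, in first-occurrence order
lemma keys_bucketsB (arr : List (String × String)) :
    ((arr.foldl (fun d q => d.modify (PySem.Str.len q.1) [] (· ++ [q]))
        PySem.Dict.empty).keys)
      = PySem.Set.ofList (arr.map (fun q => PySem.Str.len q.1)) := by
  have h := PySem.Dict.keys_foldl_modify_key arr (fun q => PySem.Str.len q.1)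
    ([] : List (String × String)) (fun _ q => (· ++ [q])) PySem.Dict.empty
  simpa [PySem.Dict.keys_empty, PySem.Set.update_nil_left] using h

theorem aliases_to_ordered_dict_spec : Claim_equal_aliases_to_ordered_dict := by
  intro _d _
  unfold Spec_aliases_to_ordered_dict aliases_to_ordered_dict aliases_to_ordered_dict_alt
  dsimp only
  rw [arrA_eq, bucketsB_eq, PySem.List.foldl_append_eq_flatMap]
  simp only [getD_bucketsB, keys_bucketsB, List.nil_append]
  congr 1
  apply congrArg
  have hperm := PySem.List.sorted_perm
    (PySem.Set.ofList ((pairsOf _d).map (fun q => PySem.Str.len q.1))) (fun x : Int => x) true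
  have hnd : (PySem.List.sorted
      (PySem.Set.ofList ((pairsOf _d).map (fun q => PySem.Str.len q.1)))
      (fun x : Int => x) true).Nodup :=
    hperm.nodup_iff.mpr (PySem.Set.nodup_ofList _)
  have hpw := PySem.List.sorted_pairwise_rev
    (PySem.Set.ofList ((pairsOf _d).map (fun q => PySem.Str.len q.1))) (fun x : Int => x)
  have hdec := (hpw.and hnd).imp
    (fun {a b} h => lt_of_le_of_ne h.1 h.2.symm)
  apply sorted_eq_buckets (pairsOf _d) _ hdec
  intro q hq
  rw [PySem.List.mem_sorted, PySem.Set.mem_ofList]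
  exact List.mem_map_of_mem hq
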